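-- pv_equiv track=rewrite | github.com/justnotanu/leetcode | 2044-count-number-of-maximum-bitwise-or-subsets/2044-count-number-of-maximum-bitwise-or-subsets.py | countMaxOrSubsets
-- ===== SOURCE A (Python) =====
-- from typing import List
--
-- def countMaxOrSubsets(nums: List[int]) -> int:
--     max_or = 0
--
--     # Step 1: Calculate the maximum bitwise OR
--     for num in nums:
--         max_or |= num
--
--     # Step 2: Count subsets that yield max_or
--     count = 0
--     n = len(nums)
--
--     # There are 2^n - 1 non-empty subsets
--     for i in range(1, 1 << n):  # Loop from 1 to 2^n - 1
--         subset_or = 0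
--
--         for j in range(n):
--             if i & (1 << j):  # Check if jth element is included in the subset
--                 subset_or |= nums[j]  # Update the OR for this subset
--
--         if subset_or == max_or:
--             count += 1
--
--     return count
-- ===== SOURCE B (Python) =====
-- from typing import List
--
-- def countMaxOrSubsets(nums: List[int]) -> int:
--     # Build the OR of every subset by doubling: after processing k elements,
--     # ors[i] is the OR of the subset of the first k elements selected by mask i.
--     ors = [0]
--     for num in nums:
--         ors = ors + [o | num for o in ors]
--     # ors[-1] is the OR of all elements (the maximum OR); ors[1:] are the
--     # non-empty subsets' ORs.
--     return ors[1:].count(ors[-1])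
-- ===== Notes on version B (the rewrite author's own statement) =====
-- stated objective: alternative
-- what changed: Instead of re-scanning all n bits of every mask (a nested per-mask loop), B builds the list of all 2^n subset ORs by one doubling pass (ors = ors + [o|num for o in ors]) and counts occurrences of the total OR (ors[-1]) among the non-empty entries (ors[1:]).
import Mathlib
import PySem

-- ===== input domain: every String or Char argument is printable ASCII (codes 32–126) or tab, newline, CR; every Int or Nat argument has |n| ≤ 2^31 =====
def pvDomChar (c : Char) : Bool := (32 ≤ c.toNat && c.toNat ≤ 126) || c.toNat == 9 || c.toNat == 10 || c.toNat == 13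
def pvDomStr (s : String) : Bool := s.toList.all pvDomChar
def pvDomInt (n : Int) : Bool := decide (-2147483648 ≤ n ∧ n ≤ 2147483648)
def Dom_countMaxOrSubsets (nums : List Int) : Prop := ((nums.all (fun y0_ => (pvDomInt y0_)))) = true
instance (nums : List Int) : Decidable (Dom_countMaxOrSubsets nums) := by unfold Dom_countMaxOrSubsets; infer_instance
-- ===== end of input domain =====

-- B replaces A's nested per-mask inner loop by one doubling pass that builds every
-- subset OR incrementally and counts the total OR among them (alternative algorithm).

-- ===== PORT A =====
-- literal port of A; `1 << j` with j drawn from range(n) (so j ≥ 0) is `(1:Int) <<< j.toNat`, exact here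
def countMaxOrSubsets (nums : List Int) : Int :=
  let max_or : Int := nums.foldl (fun m num => PySem.Int.bor m num) 0
  let n : Nat := nums.length
  (PySem.List.pyRange 1 ((1:Int) <<< n)).foldl
    (fun count i =>
      let subset_or : Int :=
        (PySem.List.pyRange 0 (n:Int)).foldl
          (fun s j =>
            if PySem.Int.band i ((1:Int) <<< j.toNat) ≠ 0 then
              PySem.Int.bor s (PySem.List.pyGetD nums j 0)
            else s) 0
      if subset_or = max_or then count + 1 else count) 0

-- ===== PORT B =====
def countMaxOrSubsets_alt (nums : List Int) : Int :=
  let ors : List Int :=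
    nums.foldl (fun ors num => ors ++ ors.map (fun o => PySem.Int.bor o num)) [0]
  ((PySem.List.count (PySem.List.slice ors (some 1) none) (PySem.List.pyGetD ors (-1) 0) : Nat) : Int)


-- ===== PRECONDITION & SPEC =====
def Spec_countMaxOrSubsets (nums : List Int) (out : Int) : Prop := out = countMaxOrSubsets_alt nums
instance (nums : List Int) (out : Int) : Decidable (Spec_countMaxOrSubsets nums out) := by unfold Spec_countMaxOrSubsets; infer_instance

-- ===== CLAIM (what is proved, stated in full; the proofs are below) =====
def Claim_equal_countMaxOrSubsets : Prop := ∀ (nums : List Int), Dom_countMaxOrSubsets nums → Spec_countMaxOrSubsets nums (countMaxOrSubsets nums)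

-- ===== LEMMAS AND PROOFS =====


def pvSubOr (nums : List Int) (i : Int) : Int :=
  (PySem.List.pyRange 0 (nums.length : Int)).foldl
    (fun s j =>
      if PySem.Int.band i ((1:Int) <<< j.toNat) ≠ 0 then
        PySem.Int.bor s (PySem.List.pyGetD nums j 0)
      else s) 0


theorem pv_band_ne_iff (i j : Nat) :
    (PySem.Int.band (i:Int) ((1:Int) <<< ((j:Nat):Int)) ≠ 0) ↔ i.testBit j := by
  rw [Int.one_shiftLeft]
  have h : PySem.Int.band (i:Int) ((2^j : Nat):Int) = ((i &&& 2^j : Nat) : Int) := by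
    simp only [PySem.Int.band]; norm_num; rfl
  rw [h, Nat.and_two_pow]
  cases hb : i.testBit j <;> simp

theorem pvSubOr_append_lo (p : List Int) (x : Int) (i : Nat) (hi : i < 2^p.length) :
    pvSubOr (p ++ [x]) (i:Int) = pvSubOr p (i:Int) := by
  unfold pvSubOr
  have hlen : (((p ++ [x]).length : Nat) : Int) = (p.length : Int) + 1 := by simp
  rw [hlen, PySem.List.pyRange_one_append 0 (p.length:Int) ((p.length:Int)+1) (by positivity) (by omega),
      PySem.List.pyRange_one_singleton, List.foldl_append, List.foldl_cons, List.foldl_nil]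
  rw [if_neg]
  · exact PySem.List.foldl_congr_mem _ _ _ _ (by
      intro acc j hj
      rw [PySem.List.mem_pyRange_one] at hj
      obtain ⟨h0, h1⟩ := hj
      have hj' : j = (j.toNat : Int) := (Int.toNat_of_nonneg h0).symm
      have hjl : j.toNat < p.length := by omega
      congr 1
      rw [hj', PySem.List.pyGetD_natCast, PySem.List.pyGetD_natCast, List.getD_append _ _ _ _ hjl])
  · rw [show (((p.length:Int)).toNat : Int) = ((p.length : Nat) : Int) by simp, pv_band_ne_iff]
    simp [Nat.testBit_lt_two_pow hi]

theorem pvSubOr_append_hi (p : List Int) (x : Int) (i : Nat) (hi : i < 2^p.length) :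
    pvSubOr (p ++ [x]) (((2^p.length + i : Nat)):Int) = PySem.Int.bor (pvSubOr p (i:Int)) x := by
  unfold pvSubOr
  have hlen : (((p ++ [x]).length : Nat) : Int) = (p.length : Int) + 1 := by simp
  rw [hlen, PySem.List.pyRange_one_append 0 (p.length:Int) ((p.length:Int)+1) (by positivity) (by omega),
      PySem.List.pyRange_one_singleton, List.foldl_append, List.foldl_cons, List.foldl_nil]
  rw [if_pos]
  · have hmid : List.foldl
        (fun s j => if PySem.Int.band (((2^p.length + i : Nat)):Int) ((1:Int) <<< j.toNat) ≠ 0 then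
            PySem.Int.bor s (PySem.List.pyGetD (p ++ [x]) j 0) else s) 0
        (PySem.List.pyRange 0 (p.length:Int))
        = List.foldl
        (fun s j => if PySem.Int.band (i:Int) ((1:Int) <<< j.toNat) ≠ 0 then
            PySem.Int.bor s (PySem.List.pyGetD p j 0) else s) 0
        (PySem.List.pyRange 0 (p.length:Int)) := by
      apply PySem.List.foldl_congr_mem
      intro acc j hj
      rw [PySem.List.mem_pyRange_one] at hj
      obtain ⟨h0, h1⟩ := hj
      have hj' : j = (j.toNat : Int) := (Int.toNat_of_nonneg h0).symm
      have hjl : j.toNat < p.length := by omega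
      have hget : PySem.List.pyGetD (p ++ [x]) j 0 = PySem.List.pyGetD p j 0 := by
        rw [hj', PySem.List.pyGetD_natCast, PySem.List.pyGetD_natCast,
            List.getD_append _ _ _ _ hjl]
      have hcond : (PySem.Int.band (((2^p.length + i : Nat)):Int) ((1:Int) <<< ((j.toNat:Nat):Int)) ≠ 0)
          ↔ (PySem.Int.band (i:Int) ((1:Int) <<< ((j.toNat:Nat):Int)) ≠ 0) := by
        rw [pv_band_ne_iff, pv_band_ne_iff, Nat.testBit_two_pow_add_gt hjl]
      simp only [hget, hcond]
    rw [hmid]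
    congr 1
    rw [show ((p.length:Int)) = ((p.length : Nat) : Int) from rfl, PySem.List.pyGetD_natCast]
    simp [List.getD_eq_getElem?_getD]
  · rw [show (((p.length:Int)).toNat : Int) = ((p.length : Nat) : Int) by simp, pv_band_ne_iff,
        Nat.testBit_two_pow_add_eq, Nat.testBit_lt_two_pow hi]
    simp

theorem pv_ors_spec (nums : List Int) :
    nums.foldl (fun ors num => ors ++ ors.map (fun o => PySem.Int.bor o num)) [0]
      = (List.range (2^nums.length)).map (fun k : Nat => pvSubOr nums (k:Int)) := by
  induction nums using List.reverseRecOn with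
  | nil => decide
  | append_singleton p x ih =>
    rw [List.foldl_append, List.foldl_cons, List.foldl_nil, ih]
    have hlen : (p ++ [x]).length = p.length + 1 := by simp
    have hpow : 2^(p.length + 1) = 2^p.length + 2^p.length := by ring
    rw [hlen, hpow, List.range_add, List.map_append, List.map_map, List.map_map]
    congr 1
    · exact List.map_congr_left (fun k hk => (pvSubOr_append_lo p x k (List.mem_range.mp hk)).symm)
    · exact List.map_congr_left (fun k hk => by
        have := pvSubOr_append_hi p x k (List.mem_range.mp hk)
        simp only [Function.comp_apply]
        rw [← this])

theorem pv_target_eq (nums : List Int) :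
    pvSubOr nums (((2^nums.length - 1 : Nat)):Int)
      = nums.foldl (fun m num => PySem.Int.bor m num) 0 := by
  unfold pvSubOr
  have hmid : List.foldl
      (fun s j => if PySem.Int.band (((2^nums.length - 1 : Nat)):Int) ((1:Int) <<< j.toNat) ≠ 0 then
          PySem.Int.bor s (PySem.List.pyGetD nums j 0) else s) 0
      (PySem.List.pyRange 0 (nums.length:Int))
      = List.foldl (fun s j => PySem.Int.bor s (PySem.List.pyGetD nums j 0)) 0
      (PySem.List.pyRange 0 (nums.length:Int)) := by
    apply PySem.List.foldl_congr_mem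
    intro acc j hj
    rw [PySem.List.mem_pyRange_one] at hj
    obtain ⟨h0, h1⟩ := hj
    rw [if_pos]
    rw [show j = (j.toNat:Int) from (Int.toNat_of_nonneg h0).symm, pv_band_ne_iff,
        Nat.testBit_two_pow_sub_one]
    simp; omega
  rw [hmid]
  have := PySem.List.foldl_pyRange_zero_pyGetD nums 0 (fun m num => PySem.Int.bor m num) 0
  simpa using this

theorem pv_range_tail (m : Nat) (hm : 0 < m) :
    PySem.List.pyRange 1 ((m:Nat):Int) = ((List.range m).map (fun k : Nat => (k:Int))).tail := by
  have h : PySem.List.pyRange 0 ((m:Nat):Int) = 0 :: PySem.List.pyRange (0+1) ((m:Nat):Int) :=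
    PySem.List.pyRange_one_cons (by exact_mod_cast hm)
  rw [← PySem.List.pyRange_zero_natCast, h]
  norm_num

theorem pv_A_eq (nums : List Int) :
    countMaxOrSubsets nums
      = (((List.range (2^nums.length)).tail.countP
          (fun k : Nat => decide (pvSubOr nums (k:Int)
            = nums.foldl (fun m num => PySem.Int.bor m num) 0)) : Nat) : Int) := by
  unfold countMaxOrSubsets
  have hinner : ∀ (i : Int),
      (PySem.List.pyRange 0 (nums.length:Int)).foldl
        (fun s j =>
          if PySem.Int.band i ((1:Int) <<< j.toNat) ≠ 0 then
            PySem.Int.bor s (PySem.List.pyGetD nums j 0)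
          else s) 0 = pvSubOr nums i := fun _ => rfl
  have hsh : (1:Int) <<< nums.length = ((2^nums.length : Nat) : Int) := by
    simp [Int.shiftLeft_eq]
  simp only [hinner]
  rw [hsh, pv_range_tail _ (by positivity), ← List.map_tail, List.foldl_map]
  rw [PySem.List.foldl_ite_add_one
        (fun k : Nat => pvSubOr nums (k:Int) = nums.foldl (fun m num => PySem.Int.bor m num) 0)]
  exact zero_add _

theorem pv_B_eq (nums : List Int) :
    countMaxOrSubsets_alt nums
      = (((List.range (2^nums.length)).tail.countP
          (fun k : Nat => decide (pvSubOr nums (k:Int)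
            = nums.foldl (fun m num => PySem.Int.bor m num) 0)) : Nat) : Int) := by
  unfold countMaxOrSubsets_alt
  simp only [pv_ors_spec, PySem.List.slice_from_one]
  have hsplit : List.range (2^nums.length)
      = List.range (2^nums.length - 1) ++ [2^nums.length - 1] := by
    have h1 : 2^nums.length = (2^nums.length - 1) + 1 := by
      have : 0 < 2^nums.length := by positivity
      omega
    conv_lhs => rw [h1]
    rw [List.range_succ]
  have htarget : PySem.List.pyGetD
      ((List.range (2^nums.length)).map (fun k : Nat => pvSubOr nums (k:Int))) (-1) 0
      = nums.foldl (fun m num => PySem.Int.bor m num) 0 := by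
    rw [hsplit, List.map_append, List.map_cons, List.map_nil,
        PySem.List.pyGetD_neg_one_append_singleton, pv_target_eq]
  rw [htarget, ← List.map_tail, PySem.List.count_eq, List.count_eq_countP, List.countP_map]
  congr 1


-- ===== VERDICT (by name: the statement is the Claim_ definition above) =====
theorem countMaxOrSubsets_spec : Claim_equal_countMaxOrSubsets := by
  intro nums _
  unfold Spec_countMaxOrSubsets
  rw [pv_A_eq, pv_B_eq]
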